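-- pv_equiv track=rewrite | github.com/chintanmehta21/Zettelkasten_KG | tests/test_auth_providers.py | _extract_providers_from_html
-- ===== SOURCE A (Python) =====
-- def _extract_providers_from_html(html: str) -> set[str]:
--     providers = set()
--     marker = "data-provider=\""
--     idx = 0
--     while True:
--         start = html.find(marker, idx)
--         if start == -1:
--             break
--         start += len(marker)
--         end = html.find("\"", start)
--         if end == -1:
--             break
--         providers.add(html[start:end])
--         idx = end + 1
--     return providers
-- ===== SOURCE B (Python) =====
-- import re
--
-- _PROVIDER_RE = re.compile(r'data-provider="([^"]*)"')
--
-- def _extract_providers_from_html(html: str) -> set[str]: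
--     return set(_PROVIDER_RE.findall(html))
-- ===== Notes on version B (the rewrite author's own statement) =====
-- stated objective: idiomatic
-- what changed: Replaced the manual while/str.find two-pointer scan with a single compiled-regex findall pass whose capture group grabs each quote-delimited provider value, wrapped in set(), removing all explicit index bookkeeping.
import Mathlib
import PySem

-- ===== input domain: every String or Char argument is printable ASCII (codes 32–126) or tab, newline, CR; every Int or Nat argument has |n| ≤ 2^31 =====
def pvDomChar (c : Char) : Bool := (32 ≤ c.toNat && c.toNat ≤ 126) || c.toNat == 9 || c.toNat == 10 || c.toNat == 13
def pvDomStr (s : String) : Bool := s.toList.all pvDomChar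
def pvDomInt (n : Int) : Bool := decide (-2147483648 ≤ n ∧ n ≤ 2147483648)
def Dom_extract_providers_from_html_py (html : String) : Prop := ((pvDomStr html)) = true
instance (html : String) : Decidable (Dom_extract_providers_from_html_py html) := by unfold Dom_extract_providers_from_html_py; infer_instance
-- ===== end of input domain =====

-- B replaces A's manual while/str.find index-bookkeeping scan with a single regex-findall pass
-- (pattern data-provider="([^"]*)") wrapped in set(); same behaviour, more idiomatic.

-- the marker string "data-provider=\"" both programs look for
def pvMarker : List Char := "data-provider=\"".toList

-- find spec, used for termination of the A-port loop
theorem pvFind_le {cs sub : List Char} (hsub : sub ≠ [])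
    (h : PySem.Chars.find cs sub ≠ -1) :
    sub.length + (PySem.Chars.find cs sub).toNat ≤ cs.length := by
  have h0 : PySem.Chars.findFrom cs sub ((0 : Nat) : Int) ≠ -1 := by
    simpa [PySem.Chars.findFrom_zero] using h
  have hs := PySem.Chars.findFrom_natCast_spec cs sub 0 (Nat.zero_le _) h0
  rw [show ((0:Nat):Int) = 0 from rfl, PySem.Chars.findFrom_zero] at hs
  clear h0
  have h1 := hs.2.1.length_le
  have h2 : 0 < sub.length := List.length_pos_of_ne_nil hsub
  simp [List.length_drop] at h1
  omega

-- ===== PORT A =====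
-- the while loop of A; idx is represented by the remaining suffix `rest` = html[idx:]
def pvLoopA (rest : List Char) (acc : PySem.Set String) : PySem.Set String :=
  let st := PySem.Chars.find rest pvMarker
  if hst : st = -1 then acc
  else
    let rest1 := rest.drop (st.toNat + pvMarker.length)
    let e := PySem.Chars.find rest1 ['"']
    if e = -1 then acc
    else pvLoopA (rest1.drop (e.toNat + 1)) (PySem.Set.add acc (String.ofList (rest1.take e.toNat)))
  termination_by rest.length
  decreasing_by
    have := pvFind_le (by decide : pvMarker ≠ []) hst
    simp [pvMarker] at this ⊢
    omega

def extract_providers_from_html_py (html : String) : List String :=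
  pvLoopA html.toList PySem.Set.empty

-- ===== PORT B =====
-- re.findall(r'data-provider="([^"]*)"', html): leftmost non-overlapping matches, capture groups in order
def pvScanB : List Char → List String
  | [] => []
  | c :: cs =>
    if pvMarker.isPrefixOf (c :: cs) then
      let rest := (c :: cs).drop pvMarker.length
      let v := rest.takeWhile (· ≠ '"')
      if v.length = rest.length then []
      else String.ofList v :: pvScanB (rest.drop (v.length + 1))
    else pvScanB cs
  termination_by cs => cs.length
  decreasing_by
    all_goals (simp [pvMarker] at *; try omega)

def extract_providers_from_html_py_alt (html : String) : List String :=
  PySem.Set.ofList (pvScanB html.toList)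

-- ===== PRECONDITION & SPEC =====
def Spec_extract_providers_from_html_py (html : String) (out : List String) : Prop := out = extract_providers_from_html_py_alt html
instance (html : String) (out : List String) : Decidable (Spec_extract_providers_from_html_py html out) := by unfold Spec_extract_providers_from_html_py; infer_instance

-- ===== CLAIM (what is proved, stated in full; the proofs are below) =====
def Claim_equal_extract_providers_from_html_py : Prop := ∀ (html : String), Dom_extract_providers_from_html_py html → Spec_extract_providers_from_html_py html (extract_providers_from_html_py html)

-- ===== LEMMAS AND PROOFS =====

-- B's scan yields nothing when the marker occurs nowhere
theorem pvSingletonPrefix {x : Char} {l : List Char} : [x] <+: l ↔ l.head? = some x := by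
  constructor
  · rintro ⟨t, rfl⟩; rfl
  · intro h
    cases l with
    | nil => simp at h
    | cons a t => simp at h; subst h; exact ⟨t, rfl⟩

theorem pvScanB_nil_of_not_infix {cs : List Char} (h : ¬ pvMarker <:+: cs) :
    pvScanB cs = [] := by
  induction cs with
  | nil => rw [pvScanB]
  | cons c cs ih =>
    have hnp : pvMarker.isPrefixOf (c :: cs) = false := by
      by_contra hb
      exact h ((List.isPrefixOf_iff_prefix.mp (by simpa using hb)).isInfix)
    rw [pvScanB, hnp]
    simp only [Bool.false_eq_true, if_false]
    exact ih (fun hi => h (List.infix_cons hi))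

-- B's scan skips positions where the marker is not a prefix
theorem pvScanB_drop {cs : List Char} {k : Nat} (hk : k ≤ cs.length)
    (h : ∀ i, i < k → ¬ pvMarker <+: cs.drop i) :
    pvScanB cs = pvScanB (cs.drop k) := by
  induction k generalizing cs with
  | zero => simp
  | succ k ih =>
    cases cs with
    | nil => simp at hk
    | cons c cs =>
      have hnp : pvMarker.isPrefixOf (c :: cs) = false := by
        by_contra hb
        exact h 0 (Nat.succ_pos k) (List.isPrefixOf_iff_prefix.mp (by simpa using hb))
      rw [pvScanB, hnp]
      simp only [Bool.false_eq_true, if_false, List.drop_succ_cons]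
      exact ih (by simpa using hk) (fun i hi => by simpa using h (i + 1) (by omega))

-- takeWhile up to the first occurrence of the stop character
theorem pvTakeWhile_eq_take {l : List Char} {e : Nat}
    (he : l[e]? = some '"') (hlt : ∀ i, i < e → l[i]? ≠ some '"') :
    l.takeWhile (· ≠ '"') = l.take e := by
  induction e generalizing l with
  | zero =>
    cases l with
    | nil => simp at he
    | cons a t => simp at he; subst he; simp
  | succ e ih =>
    cases l with
    | nil => simp at he
    | cons a t =>
      have ha : a ≠ '"' := by
        have := hlt 0 (Nat.succ_pos e); simpa using this
      have ht := ih (by simpa using he) (fun i hi => by simpa using hlt (i + 1) (by omega))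
      simp [ha]
      simpa using ht

-- one step of B's scan when the string starts with the marker
theorem pvScanB_marker (t : List Char) :
    pvScanB (pvMarker ++ t) =
      if (t.takeWhile (· ≠ '"')).length = t.length then []
      else String.ofList (t.takeWhile (· ≠ '"')) ::
        pvScanB (t.drop ((t.takeWhile (· ≠ '"')).length + 1)) := by
  have hp : pvMarker.isPrefixOf (pvMarker ++ t) = true := List.isPrefixOf_iff_prefix.mpr ⟨t, rfl⟩
  rw [show pvMarker ++ t = 'd' :: ("ata-provider=\"".toList ++ t) from rfl] at hp ⊢
  rw [pvScanB, hp]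
  simp [pvMarker]

-- the main loop invariant: A's loop folds B's match list into the accumulator
theorem pvLoopA_eq (n : Nat) : ∀ (rest : List Char) (acc : PySem.Set String),
    rest.length ≤ n → pvLoopA rest acc = (pvScanB rest).foldl PySem.Set.add acc := by
  induction n with
  | zero =>
    intro rest acc hlen
    have : rest = [] := List.eq_nil_of_length_eq_zero (by omega)
    subst this
    rw [pvLoopA, show pvScanB [] = [] from by rw [pvScanB]]
    exact dif_pos (by decide)
  | succ n ih =>
    intro rest acc hlen
    by_cases hst : PySem.Chars.find rest pvMarker = -1
    · have hni := (PySem.Chars.find_eq_neg_one_iff rest pvMarker).mp hst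
      rw [pvLoopA, pvScanB_nil_of_not_infix hni]
      simp [hst]
    · -- the marker occurs; locate its first occurrence
      have h0 : PySem.Chars.findFrom rest pvMarker ((0 : Nat) : Int) ≠ -1 := by
        simpa [PySem.Chars.findFrom_zero] using hst
      have hs := PySem.Chars.findFrom_natCast_spec rest pvMarker 0 (Nat.zero_le _) h0
      rw [show ((0:Nat):Int) = 0 from rfl, PySem.Chars.findFrom_zero] at hs
      obtain ⟨-, hpre, hmin⟩ := hs
      have hle := pvFind_le (by decide : pvMarker ≠ []) hst
      obtain ⟨t, ht⟩ := hpre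
      have hskip : pvScanB rest = pvScanB (pvMarker ++ t) := by
        rw [pvScanB_drop (k := (PySem.Chars.find rest pvMarker).toNat) (by omega)
          (fun i hi => hmin i (Nat.zero_le i) hi), ht]
      have hrest1 : rest.drop ((PySem.Chars.find rest pvMarker).toNat + pvMarker.length) = t := by
        rw [← List.drop_drop, ← ht, List.drop_left]
      have hm : pvMarker.length = 15 := by decide
      have htlen : t.length + pvMarker.length + (PySem.Chars.find rest pvMarker).toNat
          = rest.length := by
        have hlenht := congrArg List.length ht
        simp [List.length_drop] at hlenht
        omega
      rw [pvLoopA]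
      simp only [hst, dite_false, hrest1]
      rw [hskip, pvScanB_marker]
      by_cases he : PySem.Chars.find t ['"'] = -1
      · -- no closing quote: A stops, B's scan yields nothing more
        have hmem : '"' ∉ t := by
          have := (PySem.Chars.find_eq_neg_one_iff t ['"']).mp he
          simpa [List.singleton_infix_iff] using this
        have htw : t.takeWhile (· ≠ '"') = t :=
          List.takeWhile_eq_self_iff.mpr (fun x hx => by
            simp only [ne_eq, decide_eq_true_eq]
            exact fun hq => hmem (hq ▸ hx))
        have htw' : t.takeWhile (fun x => !decide (x = '"')) = t := by simpa using htw
        rw [he]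
        simp [htw']
      · -- closing quote at index e: both produce the value t.take e and continue past it
        have h0' : PySem.Chars.findFrom t ['"'] ((0 : Nat) : Int) ≠ -1 := by
          simpa [PySem.Chars.findFrom_zero] using he
        have hsq := PySem.Chars.findFrom_natCast_spec t ['"'] 0 (Nat.zero_le _) h0'
        rw [show ((0:Nat):Int) = 0 from rfl, PySem.Chars.findFrom_zero] at hsq
        obtain ⟨-, hpq, hminq⟩ := hsq
        have hleq := pvFind_le (by decide : (['"'] : List Char) ≠ []) he
        simp only [List.length_cons, List.length_nil] at hleq
        have hq : t[(PySem.Chars.find t ['"']).toNat]? = some '"' := by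
          rw [← List.head?_drop]
          exact pvSingletonPrefix.mp hpq
        have hltq : ∀ i, i < (PySem.Chars.find t ['"']).toNat → t[i]? ≠ some '"' := by
          intro i hi hsome
          exact hminq i (Nat.zero_le i) hi (pvSingletonPrefix.mpr (by rw [List.head?_drop]; exact hsome))
        have htw := pvTakeWhile_eq_take hq hltq
        have hvlen : (t.takeWhile (· ≠ '"')).length = (PySem.Chars.find t ['"']).toNat := by
          rw [htw]; simp; omega
        have hne : (t.takeWhile (· ≠ '"')).length ≠ t.length := by omega
        rw [if_neg he, if_neg hne]
        simp only [List.foldl_cons]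
        rw [hvlen, htw]
        exact ih _ _ (by simp only [List.length_drop]; omega)

-- ===== VERDICT (by name: the statement is the Claim_ definition above) =====
theorem extract_providers_from_html_py_spec : Claim_equal_extract_providers_from_html_py := by
  intro html _
  unfold Spec_extract_providers_from_html_py extract_providers_from_html_py extract_providers_from_html_py_alt
  rw [pvLoopA_eq html.toList.length html.toList PySem.Set.empty le_rfl, PySem.Set.ofList_eq_foldl]
  rfl
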